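-- pv_equiv track=rewrite | github.com/Tanmay-Somani/50daysofpython | Day23ex.py | multiply_words
-- ===== SOURCE A (Python) =====
-- def multiply_words(string):
--     ctr = 0
--     mul = 1
--     for i in string:
--         if i != " ":
--             ctr += 1
--         if i == " ":
--             mul *= ctr
--             ctr = 0
--     return mul
-- ===== SOURCE B (Python) =====
-- def multiply_words(string):
--     mul = 1
--     for w in string.split(" ")[:-1]:
--         mul *= len(w)
--     return mul
-- ===== Notes on version B (the rewrite author's own statement) =====
-- stated objective: simpler
-- what changed: Replaces the character-by-character counter/accumulator state machine with a split on the space separator followed by a product of segment lengths over all segments except the last.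
import Mathlib
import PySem

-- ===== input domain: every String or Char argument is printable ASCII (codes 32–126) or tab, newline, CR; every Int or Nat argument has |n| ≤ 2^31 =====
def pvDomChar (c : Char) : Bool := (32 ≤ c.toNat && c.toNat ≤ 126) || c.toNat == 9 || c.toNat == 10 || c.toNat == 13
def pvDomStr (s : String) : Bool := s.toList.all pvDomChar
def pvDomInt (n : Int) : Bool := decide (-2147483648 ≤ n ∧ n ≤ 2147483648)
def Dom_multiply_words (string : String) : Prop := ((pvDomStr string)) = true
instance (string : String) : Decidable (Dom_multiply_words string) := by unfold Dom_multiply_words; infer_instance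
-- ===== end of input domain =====

-- B replaces A's per-character counter/accumulator state machine by split(" ") and a
-- product of the lengths of all segments but the last (objective: simpler).

-- ===== PORT A =====
def multiply_words (string : String) : Int :=
  (string.toList.foldl
    (fun (st : Int × Int) i =>
      let ctr := if i ≠ ' ' then st.1 + 1 else st.1
      if i = ' ' then (0, st.2 * ctr) else (ctr, st.2))
    (0, 1)).2

-- ===== PORT B =====
def multiply_words_alt (string : String) : Int :=
  let words := (PySem.Str.split? string " ").getD []
  (PySem.List.slice words none (some (-1))).foldl
    (fun mul w => mul * (PySem.Str.len w : Int)) 1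

-- ===== PRECONDITION & SPEC =====
def Spec_multiply_words (string : String) (out : Int) : Prop := out = multiply_words_alt string
instance (string : String) (out : Int) : Decidable (Spec_multiply_words string out) := by unfold Spec_multiply_words; infer_instance

-- ===== CLAIM (what is proved, stated in full; the proofs are below) =====
def Claim_equal_multiply_words : Prop := ∀ (string : String), Dom_multiply_words string → Spec_multiply_words string (multiply_words string)

-- ===== LEMMAS AND PROOFS =====

-- product of (ctr + first segment length) and the later segment lengths, last segment dropped
def pvProdAux : List (List Char) → Int → Int
  | [], _ => 1
  | [_], _ => 1
  | s :: r :: t, ctr => (ctr + s.length) * pvProdAux (r :: t) 0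

theorem pvModifyHeadId {α : Type} (l : List α) : List.modifyHead (fun x => x) l = l := by
  cases l <;> simp

theorem pvGoSpec : ∀ (fuel : Nat) (l cur : List Char) (hacc : List (List Char)),
    l.length ≤ fuel →
    PySem.Chars.splitOn.go [' '] fuel l cur hacc =
      hacc.reverse ++ (l.splitOnP (· == ' ')).modifyHead (cur.reverse ++ ·) := by
  intro fuel
  induction fuel with
  | zero =>
    intro l cur hacc h
    have hl : l = [] := List.eq_nil_of_length_eq_zero (Nat.le_zero.mp h)
    subst hl
    simp [PySem.Chars.splitOn.go, List.splitOnP_nil]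
  | succ n ih =>
    intro l cur hacc h
    cases l with
    | nil => simp [PySem.Chars.splitOn.go, List.splitOnP_nil]
    | cons c rest =>
      by_cases hc : c = ' '
      · subst hc
        rw [show PySem.Chars.splitOn.go [' '] (n+1) (' ' :: rest) cur hacc
              = PySem.Chars.splitOn.go [' '] n rest [] (cur.reverse :: hacc) by
            simp [PySem.Chars.splitOn.go, List.isPrefixOf]]
        rw [ih rest [] _ (by simpa using Nat.lt_succ_iff.mp (Nat.lt_of_lt_of_le (Nat.lt_succ_self _) h))]
        simp [List.splitOnP_cons, pvModifyHeadId]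
      · rw [show PySem.Chars.splitOn.go [' '] (n+1) (c :: rest) cur hacc
              = PySem.Chars.splitOn.go [' '] n rest (c :: cur) hacc by
            simp [PySem.Chars.splitOn.go, List.isPrefixOf, Ne.symm hc]]
        rw [ih rest (c :: cur) hacc (by simpa using Nat.succ_le_succ_iff.mp h)]
        simp only [List.splitOnP_cons, beq_iff_eq, if_neg hc, List.modifyHead_modifyHead]
        congr 2
        funext x
        simp

theorem pvSplitOn_space (l : List Char) :
    PySem.Chars.splitOn l [' '] = l.splitOnP (· == ' ') := by
  rw [PySem.Chars.splitOn, pvGoSpec _ _ _ _ (Nat.le_succ _)]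
  simp [pvModifyHeadId]

theorem pvALoop (l : List Char) (ctr mul : Int) :
    (l.foldl
      (fun (st : Int × Int) i =>
        let c := if i ≠ ' ' then st.1 + 1 else st.1
        if i = ' ' then (0, st.2 * c) else (c, st.2)) (ctr, mul)).2
    = mul * pvProdAux (l.splitOnP (· == ' ')) ctr := by
  induction l generalizing ctr mul with
  | nil => simp [List.splitOnP_nil, pvProdAux]
  | cons c rest ih =>
    by_cases hc : c = ' '
    · subst hc
      simp only [List.foldl_cons, ne_eq, not_true_eq_false, if_false]
      rw [ih]
      rcases hne : rest.splitOnP (· == ' ') with _ | ⟨s, t⟩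
      · exact absurd hne (List.splitOnP_ne_nil _ _)
      · simp [List.splitOnP_cons, hne, pvProdAux]; ring
    · simp only [List.foldl_cons, ne_eq, hc, not_false_eq_true, if_true]
      rw [ih]
      rcases hne : rest.splitOnP (· == ' ') with _ | ⟨s, t⟩
      · exact absurd hne (List.splitOnP_ne_nil _ _)
      · cases t with
        | nil => simp [List.splitOnP_cons, hne, hc, pvProdAux]
        | cons r t' =>
          simp only [List.splitOnP_cons, beq_iff_eq, if_neg hc, hne, List.modifyHead_cons,
            pvProdAux, List.length_cons]
          push_cast
          ring

theorem pvFoldShift (f : String → Int) :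
    ∀ (l : List String) (a : Int),
    l.foldl (fun m w => m * f w) a = a * l.foldl (fun m w => m * f w) 1 := by
  intro l
  induction l with
  | nil => simp
  | cons x xs ih =>
    intro a
    simp only [List.foldl_cons]
    rw [ih (a * f x), ih (1 * f x)]
    ring

theorem pvBProd : ∀ (segs : List (List Char)),
    ((segs.map String.ofList).dropLast).foldl
      (fun mul w => mul * (PySem.Str.len w : Int)) 1 = pvProdAux segs 0 := by
  intro segs
  match segs with
  | [] => simp [pvProdAux]
  | [s] => simp [pvProdAux]
  | s :: r :: t =>
    simp only [List.map_cons, List.dropLast_cons₂, List.foldl_cons]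
    rw [pvFoldShift]
    have := pvBProd (r :: t)
    simp only [List.map_cons] at this
    rw [this]
    simp only [pvProdAux, PySem.Str.len]
    have hlen : (String.ofList s).toList = s := by simp
    rw [hlen]
    ring

-- ===== VERDICT (by name: the statement is the Claim_ definition above) =====
theorem multiply_words_spec : Claim_equal_multiply_words := by
  intro s _
  unfold Spec_multiply_words multiply_words multiply_words_alt
  rw [pvALoop]
  have hw : (PySem.Str.split? s " ").getD []
      = (s.toList.splitOnP (· == ' ')).map String.ofList := by
    have hsep : (" ".toList) = [' '] := rfl
    simp [PySem.Str.split?, PySem.Chars.split?, hsep, pvSplitOn_space]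
  rw [hw]
  simp only []
  rw [PySem.List.slice_to_neg_one, pvBProd, one_mul]
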